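-- pv_equiv track=rewrite | github.com/ryandancy/project-euler | problem124.py | gen_prime_combos
-- ===== SOURCE A (Python) =====
-- def product(s):
--   r = 1
--   for x in s:
--     r *= x
--   return r
--
-- LIMIT = 100001 # not 100000 because we need to include 100000 in the generated numbers
--
-- def gen_prime_combos(primes):
--   # Generate all combinations of primes where the product is less than LIMIT
--   for prime in primes:
--     yield [prime]
--
--   len_combo = 2
--   while len_combo < len(primes) and product(primes[:len_combo]) < LIMIT:
--     indexes = list(range(len_combo))
--     last_incremented = 0
--
--     while True:
--       prod = product(primes[i] for i in indexes)
--       while prod < LIMIT: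
--         yield [primes[i] for i in indexes]
--         indexes[-1] += 1
--         last_incremented = len_combo - 1
--         prod = product(primes[i] for i in indexes)
--
--       to_reset_to = last_incremented - 1
--       if to_reset_to < 0:
--         break
--
--       indexes[to_reset_to] += 1
--       for i in range(to_reset_to + 1, len_combo):
--         indexes[i] = indexes[i - 1] + 1
--       last_incremented = to_reset_to
--
--     len_combo += 1
-- ===== SOURCE B (Python) =====
-- LIMIT = 100001 # not 100000 because we need to include 100000 in the generated numbers
--
-- def gen_prime_combos(primes):
--   # Recursive depth-first generation with a running product, instead of A's
--   # manual index-odometer state machine: same output, combination lengths 1,2,...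
--   for prime in primes:
--     yield [prime]
--
--   n = len(primes)
--
--   def product(s):
--     r = 1
--     for x in s:
--       r *= x
--     return r
--
--   def rec(start, prod, rem):
--     # yield every strictly-index-increasing choice of `rem` further primes,
--     # beginning at index `start`, whose running product stays below LIMIT
--     for i in range(start, n):
--       new_prod = prod * primes[i]
--       if new_prod >= LIMIT:
--         break
--       if rem == 1:
--         yield [primes[i]]
--       else:
--         for tail in rec(i + 1, new_prod, rem - 1):
--           yield [primes[i]] + tail
--
--   len_combo = 2
--   while len_combo < n and product(primes[:len_combo]) < LIMIT:
--     yield from rec(0, 1, len_combo)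
--     len_combo += 1
-- ===== Notes on version B (the rewrite author's own statement) =====
-- stated objective: alternative
-- what changed: The manual index-odometer state machine (explicit indexes list, last_incremented bookkeeping, reset loops, full product re-multiplied at every step) is replaced by a recursive depth-first generator that threads a running product and prunes a branch as soon as the product reaches LIMIT.
-- outside the precondition, e.g. on gen_prime_combos([2, 3, 5]): A raises IndexError, B returns [[2], [3], [5], [2, 3], [2, 5], [3, 5]]
import Mathlib
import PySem

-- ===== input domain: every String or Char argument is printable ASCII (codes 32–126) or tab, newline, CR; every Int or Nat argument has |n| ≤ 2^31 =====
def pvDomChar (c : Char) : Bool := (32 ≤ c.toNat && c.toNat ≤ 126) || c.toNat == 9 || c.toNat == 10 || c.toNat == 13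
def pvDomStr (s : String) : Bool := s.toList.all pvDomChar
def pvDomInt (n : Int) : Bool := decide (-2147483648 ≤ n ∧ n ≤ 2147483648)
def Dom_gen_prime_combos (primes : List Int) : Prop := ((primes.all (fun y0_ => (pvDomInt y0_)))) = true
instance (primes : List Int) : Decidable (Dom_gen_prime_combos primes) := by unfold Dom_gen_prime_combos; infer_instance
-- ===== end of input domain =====

-- B replaces A's manual index-odometer state machine by a recursive depth-first
-- generator threading a running product; equal output on Pre_ (see Pre_ comment).

-- ===== PORT A =====
-- product(s): r = 1; for x in s: r *= x
def pyprodA (s : List Int) : Int := s.foldl (· * ·) 1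

-- primes[i] for i in indexes (none = IndexError), then product of the values
def pvProd? (primes : List Int) (idx : List Nat) : Option Int :=
  (idx.mapM (fun (i : Nat) => PySem.List.pyGet? primes (i : Int))).map pyprodA

-- [primes[i] for i in indexes] — only evaluated after pvProd? succeeded, so
-- every index is in range and getD is exact
def pvVal (primes : List Int) (idx : List Nat) : List Int :=
  idx.map (fun i => primes.getD i 0)

-- indexes[-1] += 1
def pvBump (idx : List Nat) : List Nat := idx.dropLast ++ [idx.getLastD 0 + 1]

-- indexes[p] += 1; for i in range(p+1, len): indexes[i] = indexes[i-1] + 1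
def pvReset (idx : List Nat) (p : Nat) : List Nat :=
  idx.take p ++ List.range' (idx.getD p 0 + 1) (idx.length - p)

-- inner `while prod < LIMIT` loop: yields, bumps the last index, recomputes prod;
-- returns (out, indexes, last_incremented, ok) — ok = false exactly where Python raises IndexError;
-- fuel (primes.length + 2 at every call) is a totality guard only: the loop bumps the last
-- index by 1 per step, so it ends (stop or IndexError) within primes.length + 2 steps
def innerA (primes : List Int) (fuel : Nat) (idx : List Nat) (li : Nat)
    (acc : List (List Int)) : List (List Int) × List Nat × Nat × Bool :=
  match fuel with
  | 0 => (acc, idx, li, false)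
  | fuel + 1 =>
    match pvProd? primes idx with
    | none => (acc, idx, li, false)
    | some p =>
      if p < 100001 then
        innerA primes fuel (pvBump idx) (idx.length - 1) (acc ++ [pvVal primes idx])
      else (acc, idx, li, true)

-- the `while True` loop: run the inner loop, then reset or break; each pass strictly
-- increases the index list in base-(len+k+2) positional value < (len+k+2)^k, so the fuel
-- passed by lenLoopA is a totality guard only and is never exhausted
def outerA (primes : List Int) (fuel : Nat) (idx : List Nat) (li : Nat)
    (acc : List (List Int)) : List (List Int) :=
  match fuel with
  | 0 => acc
  | fuel + 1 =>
    if (innerA primes (primes.length + 2) idx li acc).2.2.2 = false then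
      (innerA primes (primes.length + 2) idx li acc).1
    else if (innerA primes (primes.length + 2) idx li acc).2.2.1 = 0 then
      (innerA primes (primes.length + 2) idx li acc).1
    else
      outerA primes fuel
        (pvReset (innerA primes (primes.length + 2) idx li acc).2.1
          ((innerA primes (primes.length + 2) idx li acc).2.2.1 - 1))
        ((innerA primes (primes.length + 2) idx li acc).2.2.1 - 1)
        (innerA primes (primes.length + 2) idx li acc).1

-- while len_combo < len(primes) and product(primes[:len_combo]) < LIMIT
-- (k only increases, so primes.length units of fuel are a totality guard only)
def lenLoopA (primes : List Int) (fuel : Nat) (k : Nat) (acc : List (List Int)) :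
    List (List Int) :=
  match fuel with
  | 0 => acc
  | fuel + 1 =>
    if k < primes.length ∧ pyprodA (primes.take k) < 100001 then
      lenLoopA primes fuel (k + 1)
        (outerA primes ((primes.length + k + 2) ^ k) (List.range k) 0 acc)
    else acc

def gen_prime_combos (primes : List Int) : List (List Int) :=
  (primes.map (fun p => [p])) ++ lenLoopA primes primes.length 2 []

-- ===== PORT B =====
-- rec(start, prod, rem): for i in range(start, n): break once prod*primes[i] >= LIMIT,
-- else emit (rem == 1) or recurse with the running product (start only increases, so
-- primes.length + 1 units of fuel are a totality guard only)
def dfsB (primes : List Int) (fuel : Nat) (start : Nat) (prod : Int) (rem : Nat) :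
    List (List Int) :=
  match fuel with
  | 0 => []
  | fuel + 1 =>
    if start < primes.length then
      if 100001 ≤ prod * primes.getD start 0 then []
      else
        (if rem = 1 then [[primes.getD start 0]]
         else (dfsB primes fuel (start + 1) (prod * primes.getD start 0) (rem - 1)).map
                (fun t => primes.getD start 0 :: t))
        ++ dfsB primes fuel (start + 1) prod rem
    else []

def lenLoopB (primes : List Int) (fuel : Nat) (k : Nat) : List (List Int) :=
  match fuel with
  | 0 => []
  | fuel + 1 =>
    if k < primes.length ∧ pyprodA (primes.take k) < 100001 then
      dfsB primes (primes.length + 1) 0 1 k ++ lenLoopB primes fuel (k + 1)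
    else []

def gen_prime_combos_alt (primes : List Int) : List (List Int) :=
  (primes.map (fun p => [p])) ++ lenLoopB primes primes.length 2

-- ===== PRECONDITION & SPEC =====
-- Pre_ excludes exactly (a) the inputs on which A raises IndexError — on a list of
-- ≥ 3 nondecreasing values ≥ 2 the odometer bumps the last index past the end of the
-- list precisely when primes[0]*primes[1] < 100001 and primes[0]*primes[-1] < 100001,
-- so the third disjunct is the no-crash condition on that domain — and (b) lists that
-- are not nondecreasing or contain values < 2 (with ≥ 3 elements and first-pair
-- product < 100001), a corner outside the function's sorted-prime-list purpose on
-- which A either raises or, when it returns, emits a pruning-order-dependent subset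
-- of the combinations (both A's and B's subsets are sortedness artefacts and neither
-- would be specified).
def Pre_gen_prime_combos (primes : List Int) : Prop :=
  primes.length ≤ 2
  ∨ 100001 ≤ primes.getD 0 0 * primes.getD 1 0
  ∨ (List.IsChain (· ≤ ·) primes ∧ (∀ x ∈ primes, 2 ≤ x)
      ∧ 100001 ≤ primes.getD 0 0 * primes.getLastD 0)

instance (primes : List Int) : Decidable (Pre_gen_prime_combos primes) := by
  unfold Pre_gen_prime_combos; infer_instance

def pvWitness_gen_prime_combos : List Int := [3, 5, 7, 50000]

def Spec_gen_prime_combos (primes : List Int) (out : List (List Int)) : Prop :=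
  out = gen_prime_combos_alt primes
instance (primes : List Int) (out : List (List Int)) : Decidable (Spec_gen_prime_combos primes out) := by
  unfold Spec_gen_prime_combos; infer_instance

-- ===== CLAIM (what is proved, stated in full; the proofs are below) =====
def Claim_equal_gen_prime_combos : Prop :=
  ∀ (primes : List Int), Dom_gen_prime_combos primes → Pre_gen_prime_combos primes →
    Spec_gen_prime_combos primes (gen_prime_combos primes)

-- ===== LEMMAS AND PROOFS =====

-- one-step unfolding of the fuel recursions (definitional)
theorem innerA_succ (primes : List Int) (fuel : Nat) (idx : List Nat) (li : Nat)
    (acc : List (List Int)) :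
    innerA primes (fuel + 1) idx li acc =
      match pvProd? primes idx with
      | none => (acc, idx, li, false)
      | some p =>
        if p < 100001 then
          innerA primes fuel (pvBump idx) (idx.length - 1) (acc ++ [pvVal primes idx])
        else (acc, idx, li, true) := rfl

theorem outerA_succ (primes : List Int) (fuel : Nat) (idx : List Nat) (li : Nat)
    (acc : List (List Int)) :
    outerA primes (fuel + 1) idx li acc =
      if (innerA primes (primes.length + 2) idx li acc).2.2.2 = false then
        (innerA primes (primes.length + 2) idx li acc).1
      else if (innerA primes (primes.length + 2) idx li acc).2.2.1 = 0 then
        (innerA primes (primes.length + 2) idx li acc).1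
      else
        outerA primes fuel
          (pvReset (innerA primes (primes.length + 2) idx li acc).2.1
            ((innerA primes (primes.length + 2) idx li acc).2.2.1 - 1))
          ((innerA primes (primes.length + 2) idx li acc).2.2.1 - 1)
          (innerA primes (primes.length + 2) idx li acc).1 := rfl

theorem lenLoopA_succ (primes : List Int) (fuel k : Nat) (acc : List (List Int)) :
    lenLoopA primes (fuel + 1) k acc =
      if k < primes.length ∧ pyprodA (primes.take k) < 100001 then
        lenLoopA primes fuel (k + 1)
          (outerA primes ((primes.length + k + 2) ^ k) (List.range k) 0 acc)
      else acc := rfl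

theorem dfsB_succ (primes : List Int) (fuel start : Nat) (prod : Int) (rem : Nat) :
    dfsB primes (fuel + 1) start prod rem =
      if start < primes.length then
        if 100001 ≤ prod * primes.getD start 0 then []
        else
          (if rem = 1 then [[primes.getD start 0]]
           else (dfsB primes fuel (start + 1) (prod * primes.getD start 0) (rem - 1)).map
                  (fun t => primes.getD start 0 :: t))
          ++ dfsB primes fuel (start + 1) prod rem
      else [] := rfl

theorem lenLoopB_succ (primes : List Int) (fuel k : Nat) :
    lenLoopB primes (fuel + 1) k =
      if k < primes.length ∧ pyprodA (primes.take k) < 100001 then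
        dfsB primes (primes.length + 1) 0 1 k ++ lenLoopB primes fuel (k + 1)
      else [] := rfl

theorem lenLoopA_stop {primes : List Int} {k : Nat} {acc : List (List Int)}
    (h : ¬(k < primes.length ∧ pyprodA (primes.take k) < 100001)) :
    ∀ fuel, lenLoopA primes fuel k acc = acc := by
  intro fuel
  cases fuel with
  | zero => rfl
  | succ fuel => rw [lenLoopA_succ, if_neg h]

theorem lenLoopB_stop {primes : List Int} {k : Nat}
    (h : ¬(k < primes.length ∧ pyprodA (primes.take k) < 100001)) :
    ∀ fuel, lenLoopB primes fuel k = [] := by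
  intro fuel
  cases fuel with
  | zero => rfl
  | succ fuel => rw [lenLoopB_succ, if_neg h]

-- ---------- basic product facts ----------
theorem pyprodA_eq_prod (l : List Int) : pyprodA l = l.prod :=
  (List.prod_eq_foldl).symm

theorem vals_ge_two {primes : List Int} (h2 : ∀ x ∈ primes, 2 ≤ x) {c : List Nat}
    (hc : ∀ i ∈ c, i < primes.length) : ∀ x ∈ pvVal primes c, 2 ≤ x := by
  intro x hx
  rcases List.mem_map.mp hx with ⟨i, hi, rfl⟩
  have hlt := hc i hi
  rw [List.getD_eq_getElem _ _ hlt]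
  exact h2 _ (List.getElem_mem _)

theorem prod_ge_one {l : List Int} (h : ∀ x ∈ l, 2 ≤ x) : 1 ≤ l.prod :=
  List.one_le_prod (fun x hx => le_trans (by norm_num) (h x hx))

theorem prod_ge_two {l : List Int} (hne : l ≠ []) (h : ∀ x ∈ l, 2 ≤ x) : 2 ≤ l.prod := by
  cases l with
  | nil => exact absurd rfl hne
  | cons a t =>
    rw [List.prod_cons]
    have ha : 2 ≤ a := h a List.mem_cons_self
    have ht : 1 ≤ t.prod := prod_ge_one (fun x hx => h x (List.mem_cons_of_mem _ hx))
    nlinarith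

theorem getD_ge_two {primes : List Int} (h2 : ∀ x ∈ primes, 2 ≤ x) {i : Nat}
    (hi : i < primes.length) : 2 ≤ primes.getD i 0 := by
  rw [List.getD_eq_getElem _ _ hi]
  exact h2 _ (List.getElem_mem _)

theorem getD_mono {primes : List Int} (hs : List.Pairwise (· ≤ ·) primes) {i j : Nat}
    (hij : i ≤ j) (hj : j < primes.length) : primes.getD i 0 ≤ primes.getD j 0 := by
  rcases Nat.eq_or_lt_of_le hij with rfl | hlt
  · exact le_refl _
  · have hi : i < primes.length := lt_trans hlt hj
    rw [List.getD_eq_getElem _ _ hi, List.getD_eq_getElem _ _ hj]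
    exact List.pairwise_iff_getElem.mp hs i j hi hj hlt

theorem getD_last {primes : List Int} (h : primes ≠ []) :
    primes.getD (primes.length - 1) 0 = primes.getLastD 0 := by
  rw [List.getLastD_eq_getLast?, List.getLast?_eq_getElem?]
  rw [List.getD_eq_getElem?_getD]

theorem getLastD_ge_two {primes : List Int} (h2 : ∀ x ∈ primes, 2 ≤ x)
    (hne : primes ≠ []) : 2 ≤ primes.getLastD 0 := by
  cases primes with
  | nil => exact absurd rfl hne
  | cons a t =>
    have hmem : (a :: t).getLastD 0 ∈ a :: t := by
      rw [List.getLastD_eq_getLast?]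
      cases hl : (a :: t).getLast? with
      | none => simp at hl
      | some x => simpa using List.mem_of_getLast? hl
    exact h2 _ hmem

-- head of the list bounds the product of any nonempty in-range value selection
theorem prod_vals_ge_head {primes : List Int} (hs : List.Pairwise (· ≤ ·) primes)
    (h2 : ∀ x ∈ primes, 2 ≤ x) {pre : List Nat} (hne : pre ≠ [])
    (hb : ∀ i ∈ pre, i < primes.length) :
    primes.getD 0 0 ≤ (pvVal primes pre).prod := by
  cases pre with
  | nil => exact absurd rfl hne
  | cons a t =>
    have ha : a < primes.length := hb a List.mem_cons_self
    have hmono : primes.getD 0 0 ≤ primes.getD a 0 := getD_mono hs (Nat.zero_le a) ha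
    have hrest : (1 : Int) ≤ (pvVal primes t).prod :=
      prod_ge_one (vals_ge_two h2 (fun i hi => hb i (List.mem_cons_of_mem _ hi)))
    have hval : pvVal primes (a :: t) = primes.getD a 0 :: pvVal primes t := rfl
    rw [hval, List.prod_cons]
    have hga : (2 : Int) ≤ primes.getD a 0 := getD_ge_two h2 ha
    nlinarith

-- ---------- the combination-list specification ----------
-- all strictly-increasing index lists of length `rem` over [s, n), in lexicographic order
def cfL (n s rem : Nat) : List (List Nat) :=
  match rem with
  | 0 => [[]]
  | r + 1 => (List.range' s (n - s)).flatMap (fun i => (cfL n (i + 1) r).map (i :: ·))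

-- all index combinations lexicographically ≥ idx (for idx strictly increasing, entries < n)
def CGm (n : Nat) (idx : List Nat) : List (List Nat) :=
  match idx with
  | [] => [[]]
  | i :: rest => ((CGm n rest).map (i :: ·)) ++ cfL n (i + 1) (rest.length + 1)

-- keep the combinations whose product of values is < LIMIT (given prefix product pr), as value lists
def selP (primes : List Int) (pr : Int) (l : List (List Nat)) : List (List Int) :=
  l.filterMap (fun c => if pr * (pvVal primes c).prod < 100001 then some (pvVal primes c) else none)

theorem cfL_eq_nil {n s : Nat} (h : n ≤ s) (r : Nat) : cfL n s (r + 1) = [] := by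
  unfold cfL
  rw [Nat.sub_eq_zero_of_le h]
  rfl

theorem cfL_peel {n s : Nat} (h : s < n) (r : Nat) :
    cfL n s (r + 1) = ((cfL n (s + 1) r).map (s :: ·)) ++ cfL n (s + 1) (r + 1) := by
  conv_lhs => rw [cfL]
  have hns : n - s = (n - (s + 1)) + 1 := by omega
  rw [hns, List.range'_succ, List.flatMap_cons]
  rfl

theorem cfL_mem {n s r : Nat} : ∀ {c : List Nat}, c ∈ cfL n s r →
    c.length = r ∧ (∀ j, j < r → s + j ≤ c.getD j 0) ∧ (∀ x ∈ c, x < n) := by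
  induction r generalizing s with
  | zero =>
    intro c hc
    simp [cfL] at hc
    subst hc
    exact ⟨rfl, by omega, by simp⟩
  | succ r ih =>
    intro c hc
    unfold cfL at hc
    rcases List.mem_flatMap.mp hc with ⟨i, hi, hci⟩
    rcases List.mem_map.mp hci with ⟨c', hc', rfl⟩
    have hi' := List.mem_range'_1.mp hi
    obtain ⟨hlen, hdom, hbnd⟩ := ih hc'
    refine ⟨by simp [hlen], ?_, ?_⟩
    · intro j hj
      cases j with
      | zero => simpa using hi'.1
      | succ j =>
        have := hdom j (by omega)
        simp only [List.getD_cons_succ]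
        omega
    · intro x hx
      rcases List.mem_cons.mp hx with rfl | hx'
      · omega
      · exact hbnd x hx'

theorem cfL_one (n s : Nat) : cfL n s 1 = (List.range' s (n - s)).map (fun i => [i]) := by
  unfold cfL
  induction (List.range' s (n - s)) with
  | nil => rfl
  | cons a t iht => simp_all [cfL]

theorem CG_single {n x : Nat} (hx : x < n) :
    CGm n [x] = (List.range' x (n - x)).map (fun i => [i]) := by
  show ((CGm n []).map (x :: ·)) ++ cfL n (x + 1) 1 = _
  have hnx : n - x = (n - (x + 1)) + 1 := by omega
  rw [hnx, List.range'_succ, List.map_cons, cfL_one]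
  rfl

theorem CG_consec {n : Nat} : ∀ {m s : Nat}, s + m ≤ n →
    CGm n (List.range' s m) = cfL n s m := by
  intro m
  induction m with
  | zero => intro s _; rfl
  | succ m ih =>
    intro s hsm
    rw [List.range'_succ]
    show ((CGm n (List.range' (s+1) m)).map (s :: ·)) ++ cfL n (s + 1) ((List.range' (s+1) m).length + 1) = _
    rw [ih (by omega), List.length_range']
    conv_rhs => rw [cfL_peel (show s < n by omega) m]

theorem CG_skip {n : Nat} (a b m : Nat) (h1 : a + m + 2 ≤ n) (h2 : b + m ≤ n) :
    ∀ pre, CGm n (pre ++ a :: List.range' b m) =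
      (cfL n b m).map (fun c => pre ++ a :: c) ++ CGm n (pre ++ List.range' (a + 1) (m + 1)) := by
  intro pre
  induction pre with
  | nil =>
    show (CGm n (List.range' b m)).map (a :: ·) ++ cfL n (a + 1) ((List.range' b m).length + 1) = _
    rw [CG_consec h2, List.length_range']
    simp only [List.nil_append]
    rw [CG_consec (show (a + 1) + (m + 1) ≤ n by omega)]
  | cons q pre ih =>
    show (CGm n (pre ++ a :: List.range' b m)).map (q :: ·)
        ++ cfL n (q + 1) ((pre ++ a :: List.range' b m).length + 1) = _
    rw [ih]
    conv_rhs => rw [CGm.eq_def]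
    simp [List.map_append, List.map_map, Function.comp_def, List.append_assoc]

theorem CG_block {n : Nat} (bL t : Nat) (hb : bL + 3 ≤ n) (ht : t < n) :
    ∀ pre0, CGm n (pre0 ++ [bL, t]) =
      (List.range' t (n - t)).map (fun u => pre0 ++ [bL, u]) ++ CGm n (pre0 ++ [bL + 1, bL + 2]) := by
  intro pre0
  induction pre0 with
  | nil =>
    show (CGm n [t]).map (bL :: ·) ++ cfL n (bL + 1) 2 = _
    rw [CG_single ht]
    have hcg : CGm n [bL + 2] = cfL n (bL + 2) 1 := by
      rw [CG_single (show bL + 2 < n by omega), cfL_one]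
    have : CGm n ([] ++ [bL + 1, bL + 2]) = cfL n (bL + 1) 2 := by
      show (CGm n [bL + 2]).map ((bL + 1) :: ·) ++ cfL n (bL + 2) 2 = _
      rw [hcg, ← cfL_peel (show bL + 1 < n by omega) 1]
    rw [this]
    simp [List.map_map, Function.comp_def]
  | cons q pre ih =>
    show (CGm n (pre ++ [bL, t])).map (q :: ·) ++ cfL n (q + 1) ((pre ++ [bL, t]).length + 1) = _
    rw [ih]
    conv_rhs => rw [CGm.eq_def]
    simp [List.map_append, List.map_map, Function.comp_def, List.append_assoc]

theorem vals_run_entries {primes : List Int} (h2 : ∀ x ∈ primes, 2 ≤ x) {b m : Nat}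
    (h : b + m ≤ primes.length) : ∀ x ∈ pvVal primes (List.range' b m), 2 ≤ x := by
  apply vals_ge_two h2
  intro i hi
  have := List.mem_range'_1.mp hi
  omega

theorem prod_run_le {primes : List Int} (hs : List.Pairwise (· ≤ ·) primes)
    (h2 : ∀ x ∈ primes, 2 ≤ x) :
    ∀ {m s b : Nat} {c : List Nat}, c ∈ cfL primes.length s m → b ≤ s →
      b + m ≤ primes.length →
      (pvVal primes (List.range' b m)).prod ≤ (pvVal primes c).prod := by
  intro m
  induction m with
  | zero =>
    intro s b c hc _ _
    simp [cfL] at hc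
    subst hc
    simp [pvVal]
  | succ m ih =>
    intro s b c hc hbs hbm
    unfold cfL at hc
    rcases List.mem_flatMap.mp hc with ⟨i, hi, hci⟩
    rcases List.mem_map.mp hci with ⟨c', hc', rfl⟩
    have hi' := List.mem_range'_1.mp hi
    rw [List.range'_succ]
    show (primes.getD b 0 :: pvVal primes (List.range' (b+1) m)).prod ≤
      (primes.getD i 0 :: pvVal primes c').prod
    rw [List.prod_cons, List.prod_cons]
    have hgb : primes.getD b 0 ≤ primes.getD i 0 :=
      getD_mono hs (by omega) (by omega)
    have hple : (pvVal primes (List.range' (b+1) m)).prod ≤ (pvVal primes c').prod :=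
      ih hc' (by omega) (by omega)
    have hp1 : (1:Int) ≤ (pvVal primes (List.range' (b+1) m)).prod :=
      prod_ge_one (vals_run_entries h2 (by omega))
    have hg2 : (2:Int) ≤ primes.getD i 0 := getD_ge_two h2 (by omega)
    exact mul_le_mul hgb hple (by omega) (by omega)

theorem selP_append (primes : List Int) (pr : Int) (l1 l2 : List (List Nat)) :
    selP primes pr (l1 ++ l2) = selP primes pr l1 ++ selP primes pr l2 :=
  List.filterMap_append

theorem selP_nil_of {primes : List Int} {pr : Int} {l : List (List Nat)}
    (h : ∀ c ∈ l, 100001 ≤ pr * (pvVal primes c).prod) : selP primes pr l = [] := by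
  apply List.filterMap_eq_nil_iff.mpr
  intro c hc
  simp [if_neg (not_lt.mpr (h c hc))]

theorem selP_map_cons (primes : List Int) (pr : Int) (s : Nat) (l : List (List Nat)) :
    selP primes pr (l.map (s :: ·)) =
      (selP primes (pr * primes.getD s 0) l).map (primes.getD s 0 :: ·) := by
  induction l with
  | nil => rfl
  | cons c l ih =>
    simp only [List.map_cons]
    show List.filterMap _ (_ :: _) = _
    rw [List.filterMap_cons]
    unfold selP at ih ⊢
    rw [List.filterMap_cons]
    have hval : pvVal primes (s :: c) = primes.getD s 0 :: pvVal primes c := rfl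
    have hprod : pr * (pvVal primes (s :: c)).prod
        = (pr * primes.getD s 0) * (pvVal primes c).prod := by
      rw [hval, List.prod_cons, mul_assoc]
    by_cases hcond : (pr * primes.getD s 0) * (pvVal primes c).prod < 100001
    · rw [if_pos (by rw [hprod]; exact hcond), if_pos hcond]
      simp only [List.map_cons, hval]
      rw [ih]
    · rw [if_neg (by rw [hprod]; exact hcond), if_neg hcond]
      rw [ih]

-- ---------- positional-encoding lemmas (the outer loop's fuel bound) ----------
def pvEncode (b : Nat) (idx : List Nat) : Nat := idx.foldl (fun a d => a * b + d) 0

theorem enc_shift (b : Nat) : ∀ (ys : List Nat) (a : Nat),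
    List.foldl (fun acc d => acc * b + d) a ys = a * b ^ ys.length + pvEncode b ys := by
  intro ys
  induction ys with
  | nil => intro a; simp [pvEncode]
  | cons y ys ih =>
    intro a
    show List.foldl _ (a * b + y) ys = a * b ^ (ys.length + 1) + pvEncode b (y :: ys)
    rw [ih (a * b + y)]
    have : pvEncode b (y :: ys) = y * b ^ ys.length + pvEncode b ys := by
      show List.foldl _ (0 * b + y) ys = _
      rw [ih (0 * b + y)]
      ring_nf
    rw [this]
    ring

theorem enc_append (b : Nat) (xs ys : List Nat) :
    pvEncode b (xs ++ ys) = pvEncode b xs * b ^ ys.length + pvEncode b ys := by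
  unfold pvEncode
  rw [List.foldl_append, enc_shift]
  rfl

theorem enc_cons (b x : Nat) (xs : List Nat) :
    pvEncode b (x :: xs) = x * b ^ xs.length + pvEncode b xs := by
  show List.foldl _ (0 * b + x) xs = _
  rw [enc_shift]
  ring_nf

theorem enc_lt_pow {b : Nat} (hb : 1 ≤ b) : ∀ {xs : List Nat},
    (∀ x ∈ xs, x < b) → pvEncode b xs < b ^ xs.length := by
  intro xs
  induction xs with
  | nil => intro _; simp [pvEncode]
  | cons x xs ih =>
    intro h
    have hx : x < b := h x List.mem_cons_self
    have hxs := ih (fun y hy => h y (List.mem_cons_of_mem _ hy))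
    rw [enc_cons]
    calc x * b ^ xs.length + pvEncode b xs < x * b ^ xs.length + b ^ xs.length := by omega
      _ = (x + 1) * b ^ xs.length := by ring
      _ ≤ b * b ^ xs.length := Nat.mul_le_mul_right _ (by omega)
      _ = b ^ (xs.length + 1) := by ring

theorem enc_lt_mid {b : Nat} (hb : 1 ≤ b) (p u v : List Nat) (a a' : Nat)
    (hl : u.length = v.length) (ha : a < a') (hu : ∀ x ∈ u, x < b) :
    pvEncode b (p ++ a :: u) < pvEncode b (p ++ a' :: v) := by
  rw [enc_append b p (a :: u), enc_append b p (a' :: v), enc_cons, enc_cons]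
  have hup : pvEncode b u < b ^ u.length := enc_lt_pow hb hu
  rw [hl] at hup ⊢
  simp only [List.length_cons, hl]
  have key : a * b ^ v.length + pvEncode b u < a' * b ^ v.length + pvEncode b v := by
    calc a * b ^ v.length + pvEncode b u < (a + 1) * b ^ v.length := by
          have : (a + 1) * b ^ v.length = a * b ^ v.length + b ^ v.length := by ring
          omega
      _ ≤ a' * b ^ v.length := Nat.mul_le_mul_right _ (by omega)
      _ ≤ a' * b ^ v.length + pvEncode b v := Nat.le_add_right _ _
  omega

-- ---------- evaluating the port's primitives on in-range states ----------
theorem pvVal_append (primes : List Int) (xs ys : List Nat) :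
    pvVal primes (xs ++ ys) = pvVal primes xs ++ pvVal primes ys :=
  List.map_append ..

theorem pvVal_ne_nil {primes : List Int} {xs : List Nat} (h : xs ≠ []) :
    pvVal primes xs ≠ [] := by
  simpa [pvVal] using h

theorem pvProd?_eval {primes : List Int} {idx : List Nat}
    (h : ∀ i ∈ idx, i < primes.length) :
    pvProd? primes idx = some ((pvVal primes idx).prod) := by
  unfold pvProd?
  have hm : idx.mapM (fun (i : Nat) => PySem.List.pyGet? primes (i : Int))
      = some (pvVal primes idx) := by
    induction idx with
    | nil => rfl
    | cons a t iht =>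
      rw [List.mapM_cons]
      have ha : a < primes.length := h a List.mem_cons_self
      have : PySem.List.pyGet? primes ((a : Nat) : Int) = some (primes.getD a 0) := by
        rw [PySem.List.pyGet?_natCast, List.getElem?_eq_getElem ha, List.getD_eq_getElem _ _ ha]
      rw [this, iht (fun i hi => h i (List.mem_cons_of_mem _ hi))]
      rfl
  rw [hm, Option.map_some, pyprodA_eq_prod]

theorem pvBump_append (xs : List Nat) (t : Nat) : pvBump (xs ++ [t]) = xs ++ [t + 1] := by
  unfold pvBump
  simp

theorem prod_vals_ge_two {primes : List Int} (h2 : ∀ x ∈ primes, 2 ≤ x) {pre : List Nat}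
    (hne : pre ≠ []) (hb : ∀ i ∈ pre, i < primes.length) :
    (2 : Int) ≤ (pvVal primes pre).prod :=
  prod_ge_two (pvVal_ne_nil hne) (vals_ge_two h2 hb)

-- ---------- the stopping index of the inner loop ----------
def tstop (primes : List Int) (pv : Int) (t : Nat) : Nat :=
  if t < primes.length then
    (if pv * primes.getD t 0 < 100001 then tstop primes pv (t + 1) else t)
  else t
termination_by primes.length - t
decreasing_by omega

theorem tstop_ge (primes : List Int) (pv : Int) : ∀ t, t ≤ tstop primes pv t := by
  have key : ∀ d t, primes.length - t ≤ d → t ≤ tstop primes pv t := by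
    intro d
    induction d with
    | zero =>
      intro t hd
      rw [tstop, if_neg (by omega)]
    | succ d ih =>
      intro t hd
      rw [tstop]
      split
      · split
        · exact le_trans (by omega) (ih (t + 1) (by omega))
        · exact le_refl t
      · exact le_refl t
  intro t
  exact key (primes.length - t) t le_rfl

theorem tstop_valid (primes : List Int) (pv : Int) :
    ∀ t u, t ≤ u → u < tstop primes pv t → pv * primes.getD u 0 < 100001 := by
  have key : ∀ d t u, primes.length - t ≤ d → t ≤ u → u < tstop primes pv t →
      pv * primes.getD u 0 < 100001 := by
    intro d
    induction d with
    | zero =>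
      intro t u hd htu hu
      rw [tstop, if_neg (by omega)] at hu
      omega
    | succ d ih =>
      intro t u hd htu hu
      rw [tstop] at hu
      by_cases htl : t < primes.length
      · rw [if_pos htl] at hu
        by_cases hc : pv * primes.getD t 0 < 100001
        · rw [if_pos hc] at hu
          rcases Nat.eq_or_lt_of_le htu with rfl | hlt
          · exact hc
          · exact ih (t + 1) u (by omega) hlt hu
        · rw [if_neg hc] at hu
          omega
      · rw [if_neg htl] at hu
        omega
  intro t u htu hu
  exact key (primes.length - t) t u le_rfl htu hu

theorem tstop_stop (primes : List Int) (pv : Int) :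
    ∀ t, tstop primes pv t < primes.length →
      100001 ≤ pv * primes.getD (tstop primes pv t) 0 := by
  have key : ∀ d t, primes.length - t ≤ d → tstop primes pv t < primes.length →
      100001 ≤ pv * primes.getD (tstop primes pv t) 0 := by
    intro d
    induction d with
    | zero =>
      intro t hd h
      rw [tstop, if_neg (by omega)] at h ⊢
      omega
    | succ d ih =>
      intro t hd h
      by_cases htl : t < primes.length
      · by_cases hc : pv * primes.getD t 0 < 100001
        · rw [tstop, if_pos htl, if_pos hc] at h ⊢
          exact ih (t + 1) (by omega) h
        · rw [tstop, if_pos htl, if_neg hc] at h ⊢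
          omega
      · rw [tstop, if_neg htl] at h
        omega
  intro t
  exact key (primes.length - t) t le_rfl

theorem tstop_lt_len {primes : List Int} (h2 : ∀ x ∈ primes, 2 ≤ x)
    (hL : 100001 ≤ primes.getD 0 0 * primes.getLastD 0) {pv : Int}
    (hpv : primes.getD 0 0 ≤ pv) :
    ∀ t, t < primes.length → tstop primes pv t < primes.length := by
  have key : ∀ d t, primes.length - t ≤ d → t < primes.length →
      tstop primes pv t < primes.length := by
    intro d
    induction d with
    | zero => intro t hd ht; omega
    | succ d ih =>
      intro t hd ht
      rw [tstop, if_pos ht]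
      by_cases hc : pv * primes.getD t 0 < 100001
      · rw [if_pos hc]
        have htne : t + 1 < primes.length := by
          by_contra hge
          have hteq : t = primes.length - 1 := by omega
          have hne : primes ≠ [] := by
            intro hnil
            rw [hnil] at ht
            simp at ht
          rw [hteq, getD_last hne] at hc
          have hlast2 : (2 : Int) ≤ primes.getLastD 0 := getLastD_ge_two h2 hne
          nlinarith
        exact ih (t + 1) (by omega) htne
      · rw [if_neg hc]
        exact ht
  intro t ht
  exact key (primes.length - t) t le_rfl ht

theorem tstop_eq_self {primes : List Int} {pv : Int} {t : Nat} (ht : t < primes.length)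
    (h : tstop primes pv t = t) : 100001 ≤ pv * primes.getD t 0 := by
  by_contra hc
  rw [tstop, if_pos ht, if_pos (by omega)] at h
  have := tstop_ge primes pv (t + 1)
  omega

-- ---------- what the inner loop computes ----------
theorem inner_spec {primes : List Int} (hs : List.Pairwise (· ≤ ·) primes)
    (h2 : ∀ x ∈ primes, 2 ≤ x)
    (hL : 100001 ≤ primes.getD 0 0 * primes.getLastD 0) :
    ∀ (fuel : Nat) (pre : List Nat) (t li : Nat) (acc : List (List Int)),
      primes.length - t < fuel →
      pre ≠ [] → (∀ i ∈ pre, i < primes.length) → t < primes.length →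
      innerA primes fuel (pre ++ [t]) li acc =
        (acc ++ (List.range' t (tstop primes (pvVal primes pre).prod t - t)).map
            (fun u => pvVal primes (pre ++ [u])),
         pre ++ [tstop primes (pvVal primes pre).prod t],
         if tstop primes (pvVal primes pre).prod t = t then li else pre.length,
         true) := by
  intro fuel
  induction fuel with
  | zero => intro pre t li acc hd _ _ ht; omega
  | succ fuel ih =>
    intro pre t li acc hd hpre hb ht
    have hball : ∀ i ∈ pre ++ [t], i < primes.length := by
      intro i hi
      rcases List.mem_append.mp hi with hi' | hi'
      · exact hb i hi'
      · simp at hi'; omega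
    have hprod : pvProd? primes (pre ++ [t]) = some ((pvVal primes (pre ++ [t])).prod) :=
      pvProd?_eval hball
    have hsplit : (pvVal primes (pre ++ [t])).prod
        = (pvVal primes pre).prod * primes.getD t 0 := by
      rw [pvVal_append, List.prod_append]
      simp [pvVal]
    set pv := (pvVal primes pre).prod with hpv
    have hpv0 : primes.getD 0 0 ≤ pv := prod_vals_ge_head hs h2 hpre hb
    rw [innerA_succ]
    split
    · rename_i heq
      rw [hprod] at heq
      cases heq
    · rename_i p heq
      rw [hprod] at heq
      injection heq with heq
      subst heq
      rw [hsplit]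
      by_cases hc : pv * primes.getD t 0 < 100001
      · rw [if_pos hc]
        have ht1 : t + 1 < primes.length := by
          by_contra hge
          have hteq : t = primes.length - 1 := by omega
          have hne : primes ≠ [] := by
            intro hnil; rw [hnil] at ht; simp at ht
          rw [hteq, getD_last hne] at hc
          have hlast2 : (2 : Int) ≤ primes.getLastD 0 := getLastD_ge_two h2 hne
          nlinarith [hL, hpv0]
        rw [pvBump_append]
        have hlen : (pre ++ [t]).length - 1 = pre.length := by simp
        rw [hlen]
        rw [ih pre (t + 1) pre.length (acc ++ [pvVal primes (pre ++ [t])]) (by omega) hpre hb ht1]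
        have htt : tstop primes pv t = tstop primes pv (t + 1) := by
          rw [tstop, if_pos ht, if_pos hc]
        have hge1 : t + 1 ≤ tstop primes pv (t + 1) := tstop_ge primes pv (t + 1)
        have hrange : List.range' t (tstop primes pv t - t)
            = t :: List.range' (t + 1) (tstop primes pv (t + 1) - (t + 1)) := by
          rw [htt]
          have : tstop primes pv (t + 1) - t = (tstop primes pv (t + 1) - (t + 1)) + 1 := by omega
          rw [this, List.range'_succ]
        rw [hrange]
        have hne : tstop primes pv t ≠ t := by omega
        rw [if_neg hne, htt]
        simp [← hpv]
      · rw [if_neg hc]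
        have hts : tstop primes pv t = t := by
          rw [tstop, if_pos ht, if_neg hc]
        rw [hts]
        simp

-- ---------- index-list helpers for the outer loop's states ----------
theorem pairwise_lt_range'_one (s n : Nat) : (List.range' s n).Pairwise (· < ·) := by
  induction n generalizing s with
  | zero => simp
  | succ n ih =>
    rw [List.range'_succ]
    exact List.pairwise_cons.mpr
      ⟨fun y hy => by have := List.mem_range'_1.mp hy; omega, ih (s + 1)⟩

theorem getD_append_range' (p : List Nat) (v l j : Nat) (h1 : p.length ≤ j)
    (h2 : j < p.length + l) : (p ++ List.range' v l).getD j 0 = v + (j - p.length) := by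
  rw [List.getD_eq_getElem _ _ (by simp; omega)]
  rw [List.getElem_append_right h1]
  rw [List.getElem_range'_1]

theorem getD_range' (v l j : Nat) (h : j < l) : (List.range' v l).getD j 0 = v + j := by
  have := getD_append_range' [] v l j (by simp) (by simpa using h)
  simpa using this

theorem idx_decomp_zero {idx : List Nat} {k : Nat} (hlen : idx.length = k)
    (htc : ∀ j, j < k → idx.getD j 0 = idx.getD 0 0 + j) :
    idx = List.range' (idx.getD 0 0) k := by
  apply List.ext_getElem
  · simp [hlen]
  · intro j h1 h2
    rw [List.getElem_range'_1]
    rw [← List.getD_eq_getElem idx 0 h1]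
    rw [htc j (by omega)]

theorem idx_decomp_pos {idx : List Nat} {k li : Nat} (hlen : idx.length = k)
    (hli : li < k) (hli0 : 0 < li)
    (htc : ∀ j, li ≤ j → j < k → idx.getD j 0 = idx.getD li 0 + (j - li)) :
    idx = idx.take (li - 1) ++ idx.getD (li - 1) 0 :: List.range' (idx.getD li 0) (k - li) := by
  have hlt : li - 1 < idx.length := by omega
  apply List.ext_getElem
  · simp only [List.length_append, List.length_take, List.length_cons, List.length_range', hlen]
    omega
  · intro j h1 h2
    have htk : (idx.take (li - 1)).length = li - 1 := by simp [hlen]; omega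
    by_cases hj1 : j < li - 1
    · rw [List.getElem_append_left (by omega)]
      rw [List.getElem_take]
    · rw [List.getElem_append_right (by omega)]
      by_cases hj2 : j = li - 1
      · subst hj2
        have h0 : li - 1 - (idx.take (li - 1)).length = 0 := by omega
        simp only [h0, List.getElem_cons_zero]
        rw [← List.getD_eq_getElem idx 0 h1]
      · have hge : li ≤ j := by omega
        have hidx : j - (idx.take (li - 1)).length = (j - li) + 1 := by rw [htk]; omega
        simp only [hidx, List.getElem_cons_succ, List.getElem_range'_1]
        rw [← List.getD_eq_getElem idx 0 h1, htc j hge (by omega)]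

theorem selP_all_valid {primes : List Int} {pr : Int} {l : List (List Nat)}
    (h : ∀ c ∈ l, pr * (pvVal primes c).prod < 100001) :
    selP primes pr l = l.map (pvVal primes) := by
  induction l with
  | nil => rfl
  | cons c l ih =>
    unfold selP at ih ⊢
    rw [List.filterMap_cons, if_pos (h c List.mem_cons_self), List.map_cons]
    rw [ih (fun c' hc' => h c' (List.mem_cons_of_mem _ hc'))]

-- ---------- what the outer loop computes ----------
set_option maxHeartbeats 1600000 in
theorem outer_spec {primes : List Int} (hs : List.Pairwise (· ≤ ·) primes)
    (h2 : ∀ x ∈ primes, 2 ≤ x)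
    (hL : 100001 ≤ primes.getD 0 0 * primes.getLastD 0)
    {k bb Bk : Nat} (hbb : bb = primes.length + k + 2) (hBk : Bk = bb ^ k)
    (hk2 : 2 ≤ k) (hkn : k < primes.length) :
    ∀ (fuel : Nat) (idx : List Nat) (li : Nat) (acc : List (List Int)),
      Bk ≤ pvEncode bb idx + fuel →
      idx.length = k →
      List.Pairwise (· < ·) idx →
      (∀ i ∈ idx, i < primes.length) →
      (∀ j, li ≤ j → j < k → idx.getD j 0 = idx.getD li 0 + (j - li)) →
      (0 < li → idx.getD (li - 1) 0 + k + 2 ≤ primes.length + li) →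
      li < k →
      outerA primes fuel idx li acc = acc ++ selP primes 1 (CGm primes.length idx) := by
  intro fuel
  induction fuel with
  | zero =>
    intro idx li acc hm hlen hinc hbnd htc hno hli
    have hdigits : ∀ x ∈ idx, x < bb := fun x hx => by have := hbnd x hx; omega
    have henc2 : pvEncode bb idx < Bk := by
      rw [hBk, ← hlen]
      exact enc_lt_pow (by omega) hdigits
    omega
  | succ fuel IH =>
  intro idx li acc hm hlen hinc hbnd htc hno hli
  have hne : idx ≠ [] := by
    intro h; rw [h] at hlen; simp at hlen; omega
  set pre := idx.dropLast with hpre_def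
  set t := idx.getLast hne with ht_def
  have hidx : pre ++ [t] = idx := List.dropLast_concat_getLast hne
  have hpre_len : pre.length = k - 1 := by
    rw [hpre_def, List.length_dropLast, hlen]
  have hpre_ne : pre ≠ [] := by
    intro h
    rw [h] at hpre_len
    simp at hpre_len
    omega
  have hbndp : ∀ i ∈ pre, i < primes.length := by
    intro i hi
    exact hbnd i (by rw [← hidx]; exact List.mem_append_left _ hi)
  have ht : t < primes.length := hbnd t (List.getLast_mem hne)
  set pv := (pvVal primes pre).prod with hpv_def
  have hpv2 : (2 : Int) ≤ pv := prod_vals_ge_two h2 hpre_ne hbndp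
  have hpv0 : primes.getD 0 0 ≤ pv := prod_vals_ge_head hs h2 hpre_ne hbndp
  set ts := tstop primes pv t with hts_def
  have hts_ge : t ≤ ts := tstop_ge primes pv t
  have hts_lt : ts < primes.length := tstop_lt_len h2 hL hpv0 t ht
  have hsingle : ∀ u : Nat, (pvVal primes [u]).prod = primes.getD u 0 := by
    intro u
    show ([primes.getD u 0] : List Int).prod = _
    rw [List.prod_singleton]
  have hprodidx : (pvVal primes idx).prod = pv * primes.getD t 0 := by
    rw [← hidx, pvVal_append, List.prod_append, hsingle, ← hpv_def]
  have hI : innerA primes (primes.length + 2) idx li acc =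
      (acc ++ (List.range' t (ts - t)).map (fun u => pvVal primes (pre ++ [u])),
       pre ++ [ts], if ts = t then li else pre.length, true) := by
    rw [← hidx]
    exact inner_spec hs h2 hL (primes.length + 2) pre t li acc (by omega) hpre_ne hbndp ht
  rw [outerA_succ, hI]
  dsimp only
  rw [if_neg (by simp)]
  have hdigits : ∀ x ∈ idx, x < bb := fun x hx => by have := hbnd x hx; omega
  have henc2 : pvEncode bb idx < Bk := by
    rw [hBk, ← hlen]
    exact enc_lt_pow (by omega) hdigits
  by_cases hcase : ts = t
  · -- no yield: the inner loop stopped immediately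
    rw [if_pos hcase]
    have hyield : List.range' t (ts - t) = [] := by
      rw [hcase]; simp
    rw [hyield, List.map_nil, List.append_nil]
    have hLidx : 100001 ≤ (pvVal primes idx).prod := by
      rw [hprodidx]
      exact tstop_eq_self ht (hcase ▸ hts_def.symm)
    by_cases hli0 : li = 0
    · rw [if_pos hli0]
      subst hli0
      have hzero : idx = List.range' (idx.getD 0 0) k :=
        idx_decomp_zero hlen (fun j hj => by simpa using htc j (by omega) hj)
      have hck : idx.getD 0 0 + k ≤ primes.length := by
        have hmem : idx.getD (k - 1) 0 < primes.length := by
          have hk1 : k - 1 < idx.length := by omega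
          rw [List.getD_eq_getElem _ _ hk1]
          exact hbnd _ (List.getElem_mem _)
        have := htc (k - 1) (by omega) (by omega)
        omega
      rw [hzero, CG_consec hck]
      rw [selP_nil_of ?_]
      · simp
      · intro c hc
        rw [one_mul]
        calc (100001 : Int) ≤ (pvVal primes idx).prod := hLidx
          _ = (pvVal primes (List.range' (idx.getD 0 0) k)).prod := by rw [← hzero]
          _ ≤ (pvVal primes c).prod := prod_run_le hs h2 hc le_rfl hck
    · rw [if_neg hli0]
      have hli0' : 0 < li := by omega
      set a := idx.getD (li - 1) 0 with ha_def
      set b0 := idx.getD li 0 with hb0_def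
      set m0 := k - li with hm0_def
      set pre' := idx.take (li - 1) with hpre'_def
      have hdec : idx = pre' ++ a :: List.range' b0 m0 := idx_decomp_pos hlen hli hli0' htc
      have hpre'_len : pre'.length = li - 1 := by
        rw [hpre'_def]; simp [hlen]; omega
      have hno' := hno hli0'
      have ham : a + m0 + 2 ≤ primes.length := by omega
      have hb0m : b0 + m0 ≤ primes.length := by
        have hk1 : k - 1 < idx.length := by omega
        have hmem : idx.getD (k - 1) 0 < primes.length := by
          rw [List.getD_eq_getElem _ _ hk1]
          exact hbnd _ (List.getElem_mem _)
        have := htc (k - 1) (by omega) (by omega)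
        omega
      have hreset : pvReset idx (li - 1) = pre' ++ List.range' (a + 1) (m0 + 1) := by
        unfold pvReset
        rw [hlen]
        have : k - (li - 1) = m0 + 1 := by omega
        rw [this]
      have hcross : ∀ x ∈ pre', x < a := by
        have hinc' : List.Pairwise (· < ·) (pre' ++ a :: List.range' b0 m0) := hdec ▸ hinc
        have := (List.pairwise_append.mp hinc').2.2
        intro x hx
        exact this x hx a (List.mem_cons_self)
      have henc1 : pvEncode bb idx < pvEncode bb (pvReset idx (li - 1)) := by
        rw [hreset]
        conv_lhs => rw [hdec]
        have hr : List.range' (a + 1) (m0 + 1) = (a + 1) :: List.range' (a + 2) m0 := by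
          rw [List.range'_succ]
        rw [hr]
        exact enc_lt_mid (by omega) pre' (List.range' b0 m0) (List.range' (a + 2) m0) a (a + 1)
          (by simp) (by omega)
          (fun x hx => by have := List.mem_range'_1.mp hx; omega)
      rw [hcase, hidx]
      rw [IH (pvReset idx (li - 1)) (li - 1) acc (by omega)
        (by rw [hreset]; simp [hpre'_len]; omega)
        (by
          rw [hreset]
          apply List.pairwise_append.mpr
          refine ⟨List.Pairwise.sublist (List.take_sublist _ _) hinc, pairwise_lt_range'_one _ _, ?_⟩
          · intro x hx y hy
            have hxa := hcross x hx
            have := List.mem_range'_1.mp hy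
            omega)
        (by
          rw [hreset]
          intro i hi
          rcases List.mem_append.mp hi with hi' | hi'
          · exact hbnd i (List.take_subset _ _ hi')
          · have := List.mem_range'_1.mp hi'
            omega)
        (by
          intro j hj1 hj2
          rw [hreset]
          rw [getD_append_range' pre' (a + 1) (m0 + 1) j (by omega) (by rw [hpre'_len]; omega)]
          rw [getD_append_range' pre' (a + 1) (m0 + 1) (li - 1) (by omega) (by rw [hpre'_len]; omega)]
          omega)
        (by
          intro hli1
          rw [hreset]
          have hlt2 : li - 2 < pre'.length := by omega
          rw [List.getD_eq_getElem _ _ (by rw [List.length_append]; omega)]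
          rw [List.getElem_append_left (by omega)]
          simp only [show li - 1 - 1 = li - 2 from by omega]
          have hx : pre'[li - 2]'hlt2 ∈ pre' := List.getElem_mem _
          have := hcross _ hx
          omega)
        (by omega)]
      congr 1
      rw [hreset]
      have hsel0 : selP primes 1 ((cfL primes.length b0 m0).map (fun c => pre' ++ a :: c)) = [] := by
        apply selP_nil_of
        intro e he
        rcases List.mem_map.mp he with ⟨c, hc, rfl⟩
        rw [one_mul]
        have hsplit1 : (pvVal primes (pre' ++ a :: c)).prod
            = (pvVal primes pre').prod * (primes.getD a 0 * (pvVal primes c).prod) := by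
          rw [pvVal_append, List.prod_append,
            show pvVal primes (a :: c) = primes.getD a 0 :: pvVal primes c from rfl,
            List.prod_cons]
        have hsplit2 : (pvVal primes idx).prod
            = (pvVal primes pre').prod * (primes.getD a 0 * (pvVal primes (List.range' b0 m0)).prod) := by
          conv_lhs => rw [hdec]
          rw [pvVal_append, List.prod_append,
            show pvVal primes (a :: List.range' b0 m0)
              = primes.getD a 0 :: pvVal primes (List.range' b0 m0) from rfl,
            List.prod_cons]
        have hrun : (pvVal primes (List.range' b0 m0)).prod ≤ (pvVal primes c).prod :=
          prod_run_le hs h2 hc le_rfl hb0m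
        have hp1 : (1 : Int) ≤ (pvVal primes pre').prod :=
          prod_ge_one (vals_ge_two h2 (fun i hi => by
            have : i < a := hcross i hi
            omega))
        have hga : (2 : Int) ≤ primes.getD a 0 := getD_ge_two h2 (by omega)
        calc (100001 : Int) ≤ (pvVal primes idx).prod := hLidx
          _ = (pvVal primes pre').prod * (primes.getD a 0 * (pvVal primes (List.range' b0 m0)).prod) := hsplit2
          _ ≤ (pvVal primes pre').prod * (primes.getD a 0 * (pvVal primes c).prod) := by
              apply mul_le_mul_of_nonneg_left _ (by omega)
              apply mul_le_mul_of_nonneg_left hrun (by omega)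
          _ = (pvVal primes (pre' ++ a :: c)).prod := hsplit1.symm
      conv_rhs => rw [hdec, CG_skip a b0 m0 ham hb0m pre', selP_append, hsel0, List.nil_append]
  · -- the inner loop yielded at least once
    rw [if_neg hcase]
    have hk1 : ¬ (pre.length = 0) := by omega
    rw [if_neg hk1]
    set pre0 := pre.dropLast with hpre0_def
    set bL := pre.getLast hpre_ne with hbL_def
    have hpre2 : pre0 ++ [bL] = pre := List.dropLast_concat_getLast hpre_ne
    have hpre0_len : pre0.length = k - 2 := by
      rw [hpre0_def, List.length_dropLast, hpre_len]
      omega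
    have hidx2 : pre0 ++ [bL, t] = idx := by
      rw [← hidx, ← hpre2]
      simp
    have hinc2 : List.Pairwise (· < ·) (pre0 ++ [bL, t]) := hidx2.symm ▸ hinc
    have hcross2 : ∀ x ∈ pre0, x < bL := by
      have := (List.pairwise_append.mp hinc2).2.2
      intro x hx
      exact this x hx bL (List.mem_cons_self)
    have hbLt : bL < t := by
      have := (List.pairwise_append.mp hinc2).2.1
      exact (List.pairwise_cons.mp this).1 t (List.mem_cons_self)
    have hbndp0 : ∀ i ∈ pre0, i < primes.length := by
      intro i hi
      exact hbnd i (by rw [← hidx2]; exact List.mem_append_left _ hi)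
    have hprimes_ne : primes ≠ [] := by
      intro h; rw [h] at ht; simp at ht
    have hbL3 : bL + 3 ≤ primes.length := by
      by_contra hcon
      have hbl2 : bL = primes.length - 2 := by omega
      have hteq : t = primes.length - 1 := by omega
      have : ts = t := by
        rw [hts_def, tstop, if_pos ht, if_neg ?_]
        rw [hteq, getD_last hprimes_ne]
        have hlast2 : (2 : Int) ≤ primes.getLastD 0 := getLastD_ge_two h2 hprimes_ne
        have hmul : primes.getD 0 0 * primes.getLastD 0 ≤ pv * primes.getLastD 0 :=
          mul_le_mul_of_nonneg_right hpv0 (by omega)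
        omega
      exact hcase this
    have hreset2 : pvReset (pre ++ [ts]) (k - 2) = pre0 ++ [bL + 1, bL + 2] := by
      unfold pvReset
      have hl1 : (pre ++ [ts]).length = k := by simp [hpre_len]; omega
      rw [hl1]
      have htake : (pre ++ [ts]).take (k - 2) = pre0 := by
        rw [List.take_append_of_le_length (by omega), hpre0_def, List.dropLast_eq_take,
          show pre.length - 1 = k - 2 from by omega]
      have hgd : (pre ++ [ts]).getD (k - 2) 0 = bL := by
        rw [List.getD_append _ _ _ _ (by omega)]
        rw [hbL_def, List.getLast_eq_getElem]
        rw [List.getD_eq_getElem _ _ (by omega)]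
        congr 1
        omega
      rw [htake, hgd]
      have h2' : k - (k - 2) = 2 := by omega
      rw [h2']
      rfl
    have henc1 : pvEncode bb idx < pvEncode bb (pre0 ++ [bL + 1, bL + 2]) := by
      conv_lhs => rw [← hidx2]
      show pvEncode bb (pre0 ++ bL :: [t]) < pvEncode bb (pre0 ++ (bL + 1) :: [bL + 2])
      exact enc_lt_mid (by omega) pre0 [t] [bL + 2] bL (bL + 1) (by simp) (by omega)
        (by intro x hx; simp at hx; omega)
    have hplen : pre.length - 1 = k - 2 := by omega
    rw [hplen, hreset2]
    rw [IH (pre0 ++ [bL + 1, bL + 2]) (k - 2)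
      (acc ++ (List.range' t (ts - t)).map (fun u => pvVal primes (pre ++ [u]))) (by omega)
      (by simp [hpre0_len]; omega)
      (by
        apply List.pairwise_append.mpr
        refine ⟨(List.pairwise_append.mp hinc2).1, ?_, ?_⟩
        · exact List.pairwise_cons.mpr ⟨by intro y hy; simp at hy; omega, by simp⟩
        · intro x hx y hy
          have := hcross2 x hx
          simp at hy
          omega)
      (by
        intro i hi
        rcases List.mem_append.mp hi with hi' | hi'
        · exact hbndp0 i hi'
        · simp at hi'
          omega)
      (by
        intro j hj1 hj2
        have hr2 : (pre0 ++ [bL + 1, bL + 2] : List Nat) = pre0 ++ List.range' (bL + 1) 2 := rfl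
        rw [hr2]
        rw [getD_append_range' pre0 (bL + 1) 2 j (by omega) (by rw [hpre0_len]; omega)]
        rw [getD_append_range' pre0 (bL + 1) 2 (k - 2) (by omega) (by rw [hpre0_len]; omega)]
        omega)
      (by
        intro hk3
        have hlt3 : k - 3 < pre0.length := by omega
        rw [List.getD_eq_getElem _ _ (by rw [List.length_append]; omega)]
        rw [List.getElem_append_left (by omega)]
        simp only [show k - 2 - 1 = k - 3 from by omega]
        have hx : pre0[k - 3]'hlt3 ∈ pre0 := List.getElem_mem _
        have := hcross2 _ hx
        omega)
      (by omega)]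
    conv_rhs => rw [← hidx2, CG_block bL t hbL3 ht pre0]
    rw [selP_append]
    have hts_ge' : t ≤ tstop primes pv t := hts_ge
    have hts_lt' : tstop primes pv t < primes.length := hts_lt
    have hsplitr : List.range' t (primes.length - t)
        = List.range' t (ts - t) ++ List.range' ts (primes.length - ts) := by
      have h2' : primes.length - t = (ts - t) + (primes.length - ts) := by omega
      rw [h2', ← List.range'_append_1, show t + (ts - t) = ts from by omega]
    rw [hsplitr, List.map_append, selP_append]
    have happ : ∀ u : Nat, pre0 ++ [bL, u] = pre ++ [u] := by
      intro u
      rw [← hpre2]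
      simp
    have hval : ∀ u : Nat, pvVal primes (pre0 ++ [bL, u]) = pvVal primes (pre ++ [u]) := by
      intro u
      rw [happ]
    have hprody : ∀ u : Nat, u < primes.length →
        (pvVal primes (pre ++ [u])).prod = pv * primes.getD u 0 := by
      intro u hu
      rw [pvVal_append, List.prod_append, hsingle, ← hpv_def]
    have hsel1 : selP primes 1 ((List.range' t (ts - t)).map (fun u => pre0 ++ [bL, u]))
        = (List.range' t (ts - t)).map (fun u => pvVal primes (pre ++ [u])) := by
      rw [selP_all_valid ?_]
      · rw [List.map_map]
        apply List.map_congr_left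
        intro u hu
        exact hval u
      · intro c hc
        rcases List.mem_map.mp hc with ⟨u, hu, rfl⟩
        have huu := List.mem_range'_1.mp hu
        rw [one_mul, hval u, hprody u (by omega)]
        exact tstop_valid primes pv t u (by omega) (by omega)
    have hsel2 : selP primes 1 ((List.range' ts (primes.length - ts)).map (fun u => pre0 ++ [bL, u]))
        = [] := by
      apply selP_nil_of
      intro c hc
      rcases List.mem_map.mp hc with ⟨u, hu, rfl⟩
      have huu := List.mem_range'_1.mp hu
      rw [one_mul, hval u, hprody u (by omega)]
      have hmono : primes.getD ts 0 ≤ primes.getD u 0 := getD_mono hs (by omega) (by omega)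
      have hstop : 100001 ≤ pv * primes.getD ts 0 := tstop_stop primes pv t hts_lt
      calc (100001 : Int) ≤ pv * primes.getD ts 0 := hstop
        _ ≤ pv * primes.getD u 0 := mul_le_mul_of_nonneg_left hmono (by omega)
    rw [hsel1, hsel2]
    simp only [List.append_nil, List.append_assoc]

-- ---------- what B's recursion computes ----------
theorem cfL_head {n s r : Nat} {c : List Nat} (hc : c ∈ cfL n s (r + 1)) :
    ∃ i c', c = i :: c' ∧ s ≤ i ∧ i < n ∧ c' ∈ cfL n (i + 1) r := by
  unfold cfL at hc
  rcases List.mem_flatMap.mp hc with ⟨i, hi, hci⟩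
  rcases List.mem_map.mp hci with ⟨c', hc', rfl⟩
  have hi' := List.mem_range'_1.mp hi
  exact ⟨i, c', rfl, hi'.1, by omega, hc'⟩

theorem prod_vals_cf_ge_one {primes : List Int} (h2 : ∀ x ∈ primes, 2 ≤ x)
    {n s r : Nat} (hn : n = primes.length) {c : List Nat} (hc : c ∈ cfL n s r) :
    (1 : Int) ≤ (pvVal primes c).prod := by
  obtain ⟨-, -, hbnd⟩ := cfL_mem hc
  exact prod_ge_one (vals_ge_two h2 (fun i hi => by have := hbnd i hi; omega))

theorem dfs_spec {primes : List Int} (hs : List.Pairwise (· ≤ ·) primes)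
    (h2 : ∀ x ∈ primes, 2 ≤ x) :
    ∀ (fuel start : Nat) (prod : Int) (rem : Nat), primes.length - start < fuel → 1 ≤ prod →
      dfsB primes fuel start prod (rem + 1) = selP primes prod (cfL primes.length start (rem + 1)) := by
  intro fuel
  induction fuel with
  | zero =>
    intro start prod rem hd hp
    omega
  | succ fuel ih =>
    intro start prod rem hd hp
    by_cases hsl : start < primes.length
    · rw [dfsB_succ, if_pos hsl]
      rw [cfL_peel hsl rem, selP_append]
      by_cases hnp : 100001 ≤ prod * primes.getD start 0
      · rw [if_pos hnp]
        have hg2 : (2 : Int) ≤ primes.getD start 0 := getD_ge_two h2 hsl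
        have hsel1 : selP primes prod ((cfL primes.length (start + 1) rem).map (start :: ·)) = [] := by
          rw [selP_map_cons]
          rw [selP_nil_of ?_]
          · rfl
          · intro c hc
            have h1c := prod_vals_cf_ge_one h2 rfl hc
            calc (100001 : Int) ≤ prod * primes.getD start 0 := hnp
              _ = prod * primes.getD start 0 * 1 := by ring
              _ ≤ prod * primes.getD start 0 * (pvVal primes c).prod := by
                  apply mul_le_mul_of_nonneg_left h1c
                  nlinarith
        have hsel2 : selP primes prod (cfL primes.length (start + 1) (rem + 1)) = [] := by
          apply selP_nil_of
          intro c hc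
          obtain ⟨i, c', rfl, hsi, hin, hc'⟩ := cfL_head hc
          have h1c := prod_vals_cf_ge_one h2 rfl hc'
          have hmono : primes.getD start 0 ≤ primes.getD i 0 := getD_mono hs (by omega) hin
          have hvc : pvVal primes (i :: c') = primes.getD i 0 :: pvVal primes c' := rfl
          rw [hvc, List.prod_cons]
          have hgi : (2 : Int) ≤ primes.getD i 0 := getD_ge_two h2 hin
          calc (100001 : Int) ≤ prod * primes.getD start 0 := hnp
            _ ≤ prod * primes.getD i 0 := mul_le_mul_of_nonneg_left hmono (by omega)
            _ = prod * primes.getD i 0 * 1 := by ring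
            _ ≤ prod * primes.getD i 0 * (pvVal primes c').prod := by
                apply mul_le_mul_of_nonneg_left h1c
                nlinarith
            _ = prod * (primes.getD i 0 * (pvVal primes c').prod) := by ring
        rw [hsel1, hsel2]
        rfl
      · rw [if_neg hnp]
        have hnp1 : (1 : Int) ≤ prod * primes.getD start 0 := by
          have hg2 : (2 : Int) ≤ primes.getD start 0 := getD_ge_two h2 hsl
          nlinarith
        cases rem with
        | zero =>
          rw [if_pos rfl]
          have hsel1 : selP primes prod ((cfL primes.length (start + 1) 0).map (start :: ·))
              = [[primes.getD start 0]] := by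
            show selP primes prod [[start]] = _
            unfold selP
            rw [List.filterMap_cons]
            rw [if_pos (by
              show prod * (pvVal primes [start]).prod < 100001
              have : (pvVal primes [start]).prod = primes.getD start 0 := by
                show ([primes.getD start 0] : List Int).prod = _
                rw [List.prod_singleton]
              rw [this]
              omega)]
            rfl
          rw [hsel1, ih (start + 1) prod 0 (by omega) hp]
        | succ r =>
          rw [if_neg (by omega)]
          have harith : r + 1 + 1 - 1 = r + 1 := by omega
          rw [harith]
          rw [ih (start + 1) (prod * primes.getD start 0) r (by omega) hnp1]
          rw [ih (start + 1) prod (r + 1) (by omega) hp]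
          rw [selP_map_cons]
    · rw [dfsB_succ, if_neg hsl, cfL_eq_nil (by omega)]
      rfl

-- ---------- the two length loops agree ----------
theorem loops_eq {primes : List Int} (hs : List.Pairwise (· ≤ ·) primes)
    (h2 : ∀ x ∈ primes, 2 ≤ x)
    (hL : 100001 ≤ primes.getD 0 0 * primes.getLastD 0) :
    ∀ (fuel k : Nat) (acc : List (List Int)), primes.length - k ≤ fuel → 2 ≤ k →
      lenLoopA primes fuel k acc = acc ++ lenLoopB primes fuel k := by
  intro fuel
  induction fuel with
  | zero =>
    intro k acc hd hk
    show acc = acc ++ []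
    rw [List.append_nil]
  | succ fuel ih =>
    intro k acc hd hk
    by_cases hcond : k < primes.length ∧ pyprodA (primes.take k) < 100001
    · rw [lenLoopA_succ, if_pos hcond, lenLoopB_succ, if_pos hcond]
      rw [ih (k + 1) _ (by omega) (by omega)]
      have houter : outerA primes ((primes.length + k + 2) ^ k)
          (List.range k) 0 acc = acc ++ selP primes 1 (CGm primes.length (List.range k)) := by
        refine outer_spec hs h2 hL rfl rfl hk hcond.1 _ (List.range k) 0 acc
          (Nat.le_add_left _ _) List.length_range ?_ ?_ ?_ ?_ (by omega)
        · rw [List.range_eq_range']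
          exact pairwise_lt_range'_one 0 k
        · intro i hi
          have := List.mem_range.mp hi
          omega
        · intro j hj1 hj2
          rw [List.range_eq_range', getD_range' 0 k j hj2, getD_range' 0 k 0 (by omega)]
          omega
        · intro h; omega
      rw [houter]
      have hdfs : dfsB primes (primes.length + 1) 0 1 k = selP primes 1 (cfL primes.length 0 k) := by
        have hk1 : k = (k - 1) + 1 := by omega
        rw [hk1]
        exact dfs_spec hs h2 (primes.length + 1) 0 1 (k - 1) (by omega) (by omega)
      rw [hdfs]
      have hcg : CGm primes.length (List.range k) = cfL primes.length 0 k := by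
        rw [List.range_eq_range']
        exact CG_consec (by omega)
      rw [hcg, List.append_assoc]
    · rw [lenLoopA_succ, if_neg hcond, lenLoopB_succ, if_neg hcond, List.append_nil]

-- ===== VERDICT (by name: the statement is the Claim_ definition above) =====
theorem gen_prime_combos_spec : Claim_equal_gen_prime_combos := by
  intro primes hdom hpre
  unfold Spec_gen_prime_combos gen_prime_combos gen_prime_combos_alt
  congr 1
  rcases hpre with hlen2 | hp01 | ⟨hsc, h2, hL⟩
  · rw [lenLoopA_stop (fun h => by omega) _, lenLoopB_stop (fun h => by omega) _]
  · by_cases hn : primes.length ≤ 2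
    · rw [lenLoopA_stop (fun h => by omega) _, lenLoopB_stop (fun h => by omega) _]
    · match primes, hp01, hn with
      | [], _, hn => exact absurd (by simp) hn
      | [a], _, hn => exact absurd (by simp) hn
      | a :: b :: rest, hp01, hn =>
        have hprod2 : pyprodA ((a :: b :: rest).take 2) = a * b := by
          show pyprodA [a, b] = a * b
          show (1 * a) * b = a * b
          ring
        have hp01' : 100001 ≤ a * b := by
          simpa using hp01
        rw [lenLoopA_stop (fun h => by have hx := h.2; rw [hprod2] at hx; omega) _,
          lenLoopB_stop (fun h => by have hx := h.2; rw [hprod2] at hx; omega) _]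
  · have hs : List.Pairwise (· ≤ ·) primes := List.isChain_iff_pairwise.mp hsc
    rw [loops_eq hs h2 hL primes.length 2 [] (by omega) le_rfl, List.nil_append]
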